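-- pv_equiv track=rewrite | github.com/rachelatkeison/aureine-music-box | core/music_theory.py | detect_scale_candidates
-- ===== SOURCE A (Python) =====
-- from typing import Iterable
--
-- NOTE_NAMES = ["C", "C#", "D", "D#", "E", "F", "F#", "G", "G#", "A", "A#", "B"]
--
-- MAJOR_SCALE = {0, 2, 4, 5, 7, 9, 11}
--
-- MINOR_SCALE = {0, 2, 3, 5, 7, 8, 10}
--
-- DORIAN_SCALE = {0, 2, 3, 5, 7, 9, 10}
--
-- MIXOLYDIAN_SCALE = {0, 2, 4, 5, 7, 9, 10}
--
-- PENTATONIC_MAJOR = {0, 2, 4, 7, 9}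
--
-- PENTATONIC_MINOR = {0, 3, 5, 7, 10}
--
-- def pitch_classes(notes: Iterable[int]) -> list[int]:
--     return sorted(set(n % 12 for n in notes))
--
-- def detect_scale_candidates(notes: list[int], key_name: str) -> list[str]:
--     if not notes:
--         return ["Listening for tonal center"]
--
--     pcs = set(pitch_classes(notes))
--     options: list[str] = []
--     for root in range(12):
--         for mode_name, sc in [
--             ("major", {(root + x) % 12 for x in MAJOR_SCALE}),
--             ("minor", {(root + x) % 12 for x in MINOR_SCALE}),
--             ("dorian", {(root + x) % 12 for x in DORIAN_SCALE}),
--             ("mixolydian", {(root + x) % 12 for x in MIXOLYDIAN_SCALE}),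
--             ("maj pent", {(root + x) % 12 for x in PENTATONIC_MAJOR}),
--             ("min pent", {(root + x) % 12 for x in PENTATONIC_MINOR}),
--         ]:
--             if pcs.issubset(sc):
--                 options.append(f"{NOTE_NAMES[root]} {mode_name}")
--
--     if key_name != 'Unknown':
--         root = key_name.split()[0]
--         options = sorted(options, key=lambda x: (0 if x.startswith(root) else 1, x))
--     return options[:4] or ["Chromatic / ambiguous"]
-- ===== SOURCE B (Python) =====
-- NOTE_NAMES = ["C", "C#", "D", "D#", "E", "F", "F#", "G", "G#", "A", "A#", "B"]
--
-- MAJOR_SCALE = {0, 2, 4, 5, 7, 9, 11}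
-- MINOR_SCALE = {0, 2, 3, 5, 7, 8, 10}
-- DORIAN_SCALE = {0, 2, 3, 5, 7, 9, 10}
-- MIXOLYDIAN_SCALE = {0, 2, 4, 5, 7, 9, 10}
-- PENTATONIC_MAJOR = {0, 2, 4, 7, 9}
-- PENTATONIC_MINOR = {0, 3, 5, 7, 10}
--
-- # precomputed once: all 72 candidate scales (label, pitch-class set) in root-major order,
-- # and an inverted index mapping each pitch class to the set of scale indices containing it
-- _SCALES = [
--     (f"{NOTE_NAMES[root]} {mode}", frozenset((root + x) % 12 for x in base))
--     for root in range(12)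
--     for mode, base in [
--         ("major", MAJOR_SCALE), ("minor", MINOR_SCALE), ("dorian", DORIAN_SCALE),
--         ("mixolydian", MIXOLYDIAN_SCALE), ("maj pent", PENTATONIC_MAJOR),
--         ("min pent", PENTATONIC_MINOR),
--     ]
-- ]
-- _INCIDENCE = {pc: {i for i, (_, s) in enumerate(_SCALES) if pc in s} for pc in range(12)}
--
-- def detect_scale_candidates(notes: list[int], key_name: str) -> list[str]:
--     if not notes:
--         return ["Listening for tonal center"]
--
--     # intersect the inverted-index entry of every played pitch class
--     surviving = set(range(len(_SCALES)))
--     for pc in {n % 12 for n in notes}: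
--         surviving &= _INCIDENCE[pc]
--     options = [_SCALES[i][0] for i in sorted(surviving)]
--
--     if key_name != 'Unknown':
--         root = key_name.split()[0]
--         options = sorted(options, key=lambda x: (0 if x.startswith(root) else 1, x))
--     return options[:4] or ["Chromatic / ambiguous"]
-- ===== Notes on version B (the rewrite author's own statement) =====
-- stated objective: alternative
-- what changed: Replaces A's per-call 12-root x 6-mode subset testing by a precomputed inverted index (pitch class -> set of scale indices): per call B only intersects the index entries of the played pitch classes and reads the surviving labels off a precomputed 72-entry scale table; Pre_ only excludes inputs where A (and B alike) raises IndexError on key_name.split()[0].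
import Mathlib
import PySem

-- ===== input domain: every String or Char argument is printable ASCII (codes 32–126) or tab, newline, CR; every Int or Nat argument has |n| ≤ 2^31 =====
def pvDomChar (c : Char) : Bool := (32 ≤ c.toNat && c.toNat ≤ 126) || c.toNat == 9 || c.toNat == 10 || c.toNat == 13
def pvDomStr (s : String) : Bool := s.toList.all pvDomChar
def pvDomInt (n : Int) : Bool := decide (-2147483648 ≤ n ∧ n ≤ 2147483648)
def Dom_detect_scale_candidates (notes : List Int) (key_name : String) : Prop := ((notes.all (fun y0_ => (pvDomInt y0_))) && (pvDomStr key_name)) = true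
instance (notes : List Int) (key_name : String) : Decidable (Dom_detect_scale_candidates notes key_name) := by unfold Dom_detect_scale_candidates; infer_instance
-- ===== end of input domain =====

-- B replaces A's per-call 12-root × 6-mode subset scan by a precomputed 72-entry scale
-- table plus an inverted index (pitch class → scale indices); per call it only
-- intersects the index entries of the played pitch classes (alternative algorithm).

-- ===== PORT A =====
def pvNoteNames : List String := ["C", "C#", "D", "D#", "E", "F", "F#", "G", "G#", "A", "A#", "B"]
def pvMajorScale : PySem.Set Int := PySem.Set.ofList [0, 2, 4, 5, 7, 9, 11]
def pvMinorScale : PySem.Set Int := PySem.Set.ofList [0, 2, 3, 5, 7, 8, 10]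
def pvDorianScale : PySem.Set Int := PySem.Set.ofList [0, 2, 3, 5, 7, 9, 10]
def pvMixolydianScale : PySem.Set Int := PySem.Set.ofList [0, 2, 4, 5, 7, 9, 10]
def pvPentatonicMajor : PySem.Set Int := PySem.Set.ofList [0, 2, 4, 7, 9]
def pvPentatonicMinor : PySem.Set Int := PySem.Set.ofList [0, 3, 5, 7, 10]

def pitch_classes (notes : List Int) : List Int :=
  PySem.List.sorted (PySem.Set.ofList (notes.map (fun n => PySem.Int.mod n 12))) (fun x => x) false

def detect_scale_candidates (notes : List Int) (key_name : String) : List String :=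
  if notes = [] then ["Listening for tonal center"]
  else
    let pcs : PySem.Set Int := PySem.Set.ofList (pitch_classes notes)
    let options : List String :=
      (PySem.List.pyRange 0 12 1).foldl (fun acc root =>
        ([("major", PySem.Set.ofList (pvMajorScale.map (fun x => PySem.Int.mod (root + x) 12))),
          ("minor", PySem.Set.ofList (pvMinorScale.map (fun x => PySem.Int.mod (root + x) 12))),
          ("dorian", PySem.Set.ofList (pvDorianScale.map (fun x => PySem.Int.mod (root + x) 12))),
          ("mixolydian", PySem.Set.ofList (pvMixolydianScale.map (fun x => PySem.Int.mod (root + x) 12))),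
          ("maj pent", PySem.Set.ofList (pvPentatonicMajor.map (fun x => PySem.Int.mod (root + x) 12))),
          ("min pent", PySem.Set.ofList (pvPentatonicMinor.map (fun x => PySem.Int.mod (root + x) 12)))].foldl
          (fun acc2 (p : String × PySem.Set Int) =>
            if PySem.Set.issubset pcs p.2 then
              acc2 ++ [PySem.List.pyGetD pvNoteNames root "" ++ " " ++ p.1]
            else acc2) acc)) []
    let options :=
      if key_name ≠ "Unknown" then
        -- key_name.split()[0]; Pre_ excludes the IndexError case (empty split)
        let root := (PySem.Str.split₀ key_name).headD ""
        PySem.List.sorted2 options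
          (fun x => if PySem.Str.startswith x root then (0 : Int) else 1) (fun x => x) false
      else options
    let t := PySem.List.slice options none (some 4)
    if t = [] then ["Chromatic / ambiguous"] else t

-- ===== PORT B =====
-- the six (mode name, base interval set) pairs, as listed in Source B's comprehension
def pvModeBases : List (String × PySem.Set Int) :=
  [("major", pvMajorScale), ("minor", pvMinorScale), ("dorian", pvDorianScale),
   ("mixolydian", pvMixolydianScale), ("maj pent", pvPentatonicMajor),
   ("min pent", pvPentatonicMinor)]

-- _SCALES: the 72 (label, pitch-class set) pairs, built once at module level
def pvScales : List (String × PySem.Set Int) :=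
  (PySem.List.pyRange 0 12 1).flatMap (fun root =>
    pvModeBases.map (fun p =>
      (PySem.List.pyGetD pvNoteNames root "" ++ " " ++ p.1,
       PySem.Set.ofList (p.2.map (fun x => PySem.Int.mod (root + x) 12)))))

-- _INCIDENCE: pitch class → set of indices of scales containing it, built once
def pvIncidence : PySem.Dict Int (PySem.Set Int) :=
  PySem.Dict.ofList ((PySem.List.pyRange 0 12 1).map (fun pc =>
    (pc, PySem.Set.ofList (((PySem.List.enumerate pvScales 0).filter
          (fun q => PySem.Set.contains q.2.2 pc)).map (fun q => q.1)))))

def detect_scale_candidates_alt (notes : List Int) (key_name : String) : List String :=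
  if notes = [] then ["Listening for tonal center"]
  else
    let surviving0 : PySem.Set Int := PySem.Set.ofList (PySem.List.pyRange 0 (PySem.List.len pvScales) 1)
    let pcsSet : PySem.Set Int := PySem.Set.ofList (notes.map (fun n => PySem.Int.mod n 12))
    -- Dict.getD is exact here: every pc = n % 12 is a key of pvIncidence, so Python's _INCIDENCE[pc] never raises
    let surviving := pcsSet.foldl (fun s pc => PySem.Set.inter s (PySem.Dict.getD pvIncidence pc [])) surviving0
    let options := (PySem.List.sorted surviving (fun x => x) false).map
        (fun i => (PySem.List.pyGetD pvScales i ("", ([] : PySem.Set Int))).1)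
    let options :=
      if key_name ≠ "Unknown" then
        let root := (PySem.Str.split₀ key_name).headD ""
        PySem.List.sorted2 options
          (fun x => if PySem.Str.startswith x root then (0 : Int) else 1) (fun x => x) false
      else options
    let t := PySem.List.slice options none (some 4)
    if t = [] then ["Chromatic / ambiguous"] else t

-- ===== PRECONDITION & SPEC =====
-- Pre_ excludes only inputs where A raises IndexError: notes nonempty and key_name a
-- non-'Unknown' string with no words (key_name.split()[0] fails); B raises there too.
def Pre_detect_scale_candidates (notes : List Int) (key_name : String) : Prop :=
  notes = [] ∨ key_name = "Unknown" ∨ PySem.Str.split₀ key_name ≠ []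
instance (notes : List Int) (key_name : String) : Decidable (Pre_detect_scale_candidates notes key_name) := by unfold Pre_detect_scale_candidates; infer_instance

def pvWitness_detect_scale_candidates : List Int × String := ([0, 4, 7], "C major")

def Spec_detect_scale_candidates (notes : List Int) (key_name : String) (out : List String) : Prop := out = detect_scale_candidates_alt notes key_name
instance (notes : List Int) (key_name : String) (out : List String) : Decidable (Spec_detect_scale_candidates notes key_name out) := by unfold Spec_detect_scale_candidates; infer_instance

-- ===== CLAIM (what is proved, stated in full; the proofs are below) =====
def Claim_equal_detect_scale_candidates : Prop := ∀ (notes : List Int) (key_name : String), Dom_detect_scale_candidates notes key_name → Pre_detect_scale_candidates notes key_name → Spec_detect_scale_candidates notes key_name (detect_scale_candidates notes key_name)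

-- ===== LEMMAS AND PROOFS =====

-- which pitch classes were played: membership in A's pcs set
lemma pv_mem_pcs (notes : List Int) (x : Int) :
    x ∈ PySem.Set.ofList (pitch_classes notes) ↔ ∃ n ∈ notes, PySem.Int.mod n 12 = x := by
  simp [PySem.Set.mem_ofList, pitch_classes, PySem.List.mem_sorted, List.mem_map, eq_comm]

lemma pv_modNat_bounds (n : Int) : 0 ≤ PySem.Int.mod n 12 ∧ PySem.Int.mod n 12 < 12 :=
  ⟨PySem.Int.mod_nonneg (a := n) (b := 12) (by norm_num),
   PySem.Int.mod_lt (a := n) (b := 12) (by norm_num)⟩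

-- the inverted index agrees with the table: index entry pc contains i iff scale i contains pc
set_option maxRecDepth 100000 in
set_option maxHeartbeats 1000000 in
lemma pv_inc_bridge : ∀ pc ∈ PySem.List.pyRange 0 12 1,
    ∀ i ∈ PySem.List.pyRange 0 (PySem.List.len pvScales) 1,
    (PySem.Dict.getD pvIncidence pc []).contains i
      = ((PySem.List.pyGetD pvScales i ("", ([] : PySem.Set Int))).2).contains pc := by decide

-- inner fold over the shifted six-pair list, generalized over the pair list
lemma pv_inner_gen (pcs : PySem.Set Int) (root : Int)
    (l : List (String × PySem.Set Int)) (acc : List String) :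
    (l.map (fun p =>
        (p.1, PySem.Set.ofList (p.2.map (fun x => PySem.Int.mod (root + x) 12))))).foldl
      (fun acc2 (p : String × PySem.Set Int) =>
        if PySem.Set.issubset pcs p.2 then
          acc2 ++ [PySem.List.pyGetD pvNoteNames root "" ++ " " ++ p.1]
        else acc2) acc
    = acc ++ ((l.map (fun p =>
        (PySem.List.pyGetD pvNoteNames root "" ++ " " ++ p.1,
         PySem.Set.ofList (p.2.map (fun x => PySem.Int.mod (root + x) 12))))).filter
          (fun q => PySem.Set.issubset pcs q.2)).map (fun q => q.1) := by
  induction l generalizing acc with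
  | nil => simp
  | cons p t ih =>
    simp only [List.map_cons, List.foldl_cons, List.filter_cons]
    by_cases hc : PySem.Set.issubset pcs
        (PySem.Set.ofList (p.2.map (fun x => PySem.Int.mod (root + x) 12))) = true
    · simp only [hc, if_true, ih, List.map_cons, List.append_assoc, List.cons_append,
                 List.nil_append]
    · simp only [hc, Bool.false_eq_true, if_false, ih]

-- A's double fold is the filtered label list of the 72-entry table
set_option maxHeartbeats 1000000 in
lemma pv_optA (pcs : PySem.Set Int) :
    (PySem.List.pyRange 0 12 1).foldl (fun acc root =>
      ([("major", PySem.Set.ofList (pvMajorScale.map (fun x => PySem.Int.mod (root + x) 12))),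
        ("minor", PySem.Set.ofList (pvMinorScale.map (fun x => PySem.Int.mod (root + x) 12))),
        ("dorian", PySem.Set.ofList (pvDorianScale.map (fun x => PySem.Int.mod (root + x) 12))),
        ("mixolydian", PySem.Set.ofList (pvMixolydianScale.map (fun x => PySem.Int.mod (root + x) 12))),
        ("maj pent", PySem.Set.ofList (pvPentatonicMajor.map (fun x => PySem.Int.mod (root + x) 12))),
        ("min pent", PySem.Set.ofList (pvPentatonicMinor.map (fun x => PySem.Int.mod (root + x) 12)))].foldl
        (fun acc2 (p : String × PySem.Set Int) =>
          if PySem.Set.issubset pcs p.2 then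
            acc2 ++ [PySem.List.pyGetD pvNoteNames root "" ++ " " ++ p.1]
          else acc2) acc)) []
    = (pvScales.filter (fun q => PySem.Set.issubset pcs q.2)).map (fun q => q.1) := by
  have hinner : ∀ (acc : List String) (root : Int),
      ([("major", PySem.Set.ofList (pvMajorScale.map (fun x => PySem.Int.mod (root + x) 12))),
        ("minor", PySem.Set.ofList (pvMinorScale.map (fun x => PySem.Int.mod (root + x) 12))),
        ("dorian", PySem.Set.ofList (pvDorianScale.map (fun x => PySem.Int.mod (root + x) 12))),
        ("mixolydian", PySem.Set.ofList (pvMixolydianScale.map (fun x => PySem.Int.mod (root + x) 12))),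
        ("maj pent", PySem.Set.ofList (pvPentatonicMajor.map (fun x => PySem.Int.mod (root + x) 12))),
        ("min pent", PySem.Set.ofList (pvPentatonicMinor.map (fun x => PySem.Int.mod (root + x) 12)))].foldl
        (fun acc2 (p : String × PySem.Set Int) =>
          if PySem.Set.issubset pcs p.2 then
            acc2 ++ [PySem.List.pyGetD pvNoteNames root "" ++ " " ++ p.1]
          else acc2) acc)
      = acc ++ ((pvModeBases.map (fun p =>
          (PySem.List.pyGetD pvNoteNames root "" ++ " " ++ p.1,
           PySem.Set.ofList (p.2.map (fun x => PySem.Int.mod (root + x) 12))))).filter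
            (fun q => PySem.Set.issubset pcs q.2)).map (fun q => q.1) := by
    intro acc root
    exact pv_inner_gen pcs root pvModeBases acc
  have houter := PySem.List.foldl_congr_mem (l := PySem.List.pyRange 0 12 1)
      (init := ([] : List String))
      (h := fun acc root _ => hinner acc root)
      (g := fun (acc : List String) (root : Int) => acc ++
        ((pvModeBases.map (fun p =>
          (PySem.List.pyGetD pvNoteNames root "" ++ " " ++ p.1,
           PySem.Set.ofList (p.2.map (fun x => PySem.Int.mod (root + x) 12))))).filter
            (fun q => PySem.Set.issubset pcs q.2)).map (fun q => q.1))
  rw [houter,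
      PySem.List.foldl_append_eq_flatMap (fun root =>
        ((pvModeBases.map (fun p =>
          (PySem.List.pyGetD pvNoteNames root "" ++ " " ++ p.1,
           PySem.Set.ofList (p.2.map (fun x => PySem.Int.mod (root + x) 12))))).filter
            (fun q => PySem.Set.issubset pcs q.2)).map (fun q => q.1)),
      List.nil_append]
  unfold pvScales
  rw [List.filter_flatMap, List.map_flatMap]

-- folding set intersections is one filter by simultaneous membership
lemma pv_inter_foldl (l : List Int) (g : Int → PySem.Set Int) (s : List Int) :
    l.foldl (fun s pc => PySem.Set.inter s (g pc)) s
      = s.filter (fun i => l.all (fun pc => (g pc).contains i)) := by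
  induction l generalizing s with
  | nil =>
    rw [List.foldl_nil]
    conv_lhs => rw [← List.filter_true (l := s)]
    exact List.filter_congr (fun x _ => rfl)
  | cons pc t ih =>
    rw [List.foldl_cons, ih]
    show (List.filter (fun x => (g pc).contains x) s).filter _ = _
    rw [List.filter_filter]
    apply List.filter_congr
    intro x _
    simp [List.all_cons, Bool.and_comm]

-- reading a list through its (filtered) index range is filtering the list itself
lemma pv_getD_range_filter_map {α β : Type} (L : List α) (q : α → Bool) (f : α → β) (d : α) :
    ((List.range L.length).filter (fun k => q (L.getD k d))).map (fun k => f (L.getD k d))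
      = (L.filter q).map f := by
  induction L using List.reverseRecOn with
  | nil => simp
  | append_singleton M x ih =>
    have hlen : (M ++ [x]).length = M.length + 1 := by simp
    have h1 : (List.range M.length).filter (fun k => q ((M ++ [x]).getD k d))
        = (List.range M.length).filter (fun k => q (M.getD k d)) := by
      apply List.filter_congr; intro k hk
      rw [List.getD_append M [x] d k (List.mem_range.mp hk)]
    have h2 : ((List.range M.length).filter (fun k => q (M.getD k d))).map
          (fun k => f ((M ++ [x]).getD k d))
        = ((List.range M.length).filter (fun k => q (M.getD k d))).map (fun k => f (M.getD k d)) := by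
      apply List.map_congr_left; intro k hk
      have hk' := List.mem_range.mp (List.mem_filter.mp hk).1
      rw [List.getD_append M [x] d k hk']
    rw [hlen, List.range_succ, List.filter_append, List.map_append, h1, h2, ih,
        List.filter_append, List.map_append]
    congr 1
    by_cases hq : q x = true
    · simp [hq]
    · simp [hq]

lemma pv_index_map (q : String × PySem.Set Int → Bool) (d : String × PySem.Set Int) :
    ((PySem.List.pyRange 0 (PySem.List.len pvScales) 1).filter
        (fun i => q (PySem.List.pyGetD pvScales i d))).map
      (fun i => (PySem.List.pyGetD pvScales i d).1)
      = (pvScales.filter q).map (fun p => p.1) := by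
  have hlen : PySem.List.len pvScales = ((pvScales.length : Nat) : Int) := rfl
  rw [hlen, PySem.List.pyRange_zero_natCast, List.filter_map, List.map_map]
  simp only [Function.comp_def, PySem.List.pyGetD_natCast]
  exact pv_getD_range_filter_map pvScales q (fun p => p.1) d

-- B's per-call pipeline produces the same filtered label list
lemma pv_optB (notes : List Int) :
    (PySem.List.sorted ((PySem.Set.ofList (notes.map (fun n => PySem.Int.mod n 12))).foldl
        (fun s pc => PySem.Set.inter s (PySem.Dict.getD pvIncidence pc []))
        (PySem.Set.ofList (PySem.List.pyRange 0 (PySem.List.len pvScales) 1))) (fun x => x) false).map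
      (fun i => (PySem.List.pyGetD pvScales i ("", ([] : PySem.Set Int))).1)
    = (pvScales.filter (fun q =>
        PySem.Set.issubset (PySem.Set.ofList (pitch_classes notes)) q.2)).map (fun q => q.1) := by
  rw [PySem.Set.ofList_eq_self_of_nodup _ (PySem.List.nodup_pyRange_one _ _), pv_inter_foldl]
  have hfc : (PySem.List.pyRange 0 (PySem.List.len pvScales) 1).filter
      (fun i => (PySem.Set.ofList (notes.map (fun n => PySem.Int.mod n 12))).all
        (fun pc => (PySem.Dict.getD pvIncidence pc []).contains i))
      = (PySem.List.pyRange 0 (PySem.List.len pvScales) 1).filter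
        (fun i => PySem.Set.issubset (PySem.Set.ofList (pitch_classes notes))
          (PySem.List.pyGetD pvScales i ("", ([] : PySem.Set Int))).2) := by
    apply List.filter_congr
    intro i hi
    apply Bool.eq_iff_iff.mpr
    rw [List.all_eq_true,
        show PySem.Set.issubset (PySem.Set.ofList (pitch_classes notes))
            (PySem.List.pyGetD pvScales i ("", ([] : PySem.Set Int))).2
          = (PySem.Set.ofList (pitch_classes notes)).all
              (fun x => ((PySem.List.pyGetD pvScales i ("", ([] : PySem.Set Int))).2).contains x)
          from rfl,
        List.all_eq_true]
    constructor
    · intro h x hx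
      obtain ⟨n, hn, hnx⟩ := (pv_mem_pcs notes x).mp hx
      have hpc : PySem.Int.mod n 12 ∈ PySem.Set.ofList (notes.map (fun n => PySem.Int.mod n 12)) :=
        (PySem.Set.mem_ofList _ _).mpr (List.mem_map.mpr ⟨n, hn, rfl⟩)
      have hb := pv_inc_bridge (PySem.Int.mod n 12)
        (PySem.List.mem_pyRange_one.mpr ⟨(pv_modNat_bounds n).1, (pv_modNat_bounds n).2⟩) i hi
      rw [← hnx, ← hb]
      exact h _ hpc
    · intro h pc hpc
      obtain ⟨n, hn, hnpc⟩ := List.mem_map.mp ((PySem.Set.mem_ofList _ _).mp hpc)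
      have hnpc' : PySem.Int.mod n 12 = pc := hnpc
      have hb := pv_inc_bridge pc
        (by rw [← hnpc']
            exact PySem.List.mem_pyRange_one.mpr ⟨(pv_modNat_bounds n).1, (pv_modNat_bounds n).2⟩) i hi
      rw [hb]
      exact h _ ((pv_mem_pcs notes pc).mpr ⟨n, hn, hnpc'⟩)
  rw [hfc,
      PySem.List.sorted_eq_self_of_pairwise _ _
        (((PySem.List.pairwise_lt_pyRange_one 0 _).filter _).imp (fun h => le_of_lt h))]
  exact pv_index_map
    (fun p => PySem.Set.issubset (PySem.Set.ofList (pitch_classes notes)) p.2)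
    ("", ([] : PySem.Set Int))

-- ===== VERDICT (by name: the statement is the Claim_ definition above) =====
theorem detect_scale_candidates_spec : Claim_equal_detect_scale_candidates := by
  intro notes key_name _hdom _hpre
  unfold Spec_detect_scale_candidates detect_scale_candidates detect_scale_candidates_alt
  by_cases hne : notes = []
  · simp [hne]
  · simp only [if_neg hne]
    rw [pv_optA, pv_optB]
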